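-- pv_equiv track=rewrite | github.com/HAREESH14/c2java | translator/src/c_to_cpp.py | _printf_to_cout
-- ===== SOURCE A (Python) =====
-- def _printf_to_cout(args):
--     if not args: return 'cout << endl'
--     fmt = args[0]
--     # Check if it's a string literal
--     if fmt.startswith('string('):
--         fmt = fmt[7:-1]  # remove string() wrapper
--     if not fmt.startswith('"'):
--         return f'cout << {fmt}'
--
--     # Parse format string and build cout chain
--     fmt_str = fmt[1:-1]  # remove quotes
--     rest = args[1:]
--     parts = []
--     i = 0
--     arg_idx = 0
--     current_str = ''
--     while i < len(fmt_str):
--         if fmt_str[i] == '%' and i+1 < len(fmt_str):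
--             if current_str:
--                 parts.append(f'"{current_str}"')
--                 current_str = ''
--             spec = fmt_str[i+1]
--             if spec == 'n':
--                 parts.append('endl')
--                 i += 2
--                 continue
--             elif spec == '%':
--                 current_str += '%'
--                 i += 2
--                 continue
--             # Skip format specifier chars
--             j = i + 1
--             while j < len(fmt_str) and fmt_str[j] in 'diouxXeEfgGaAcspnlhqjzt.0123456789-+ #*L':
--                 j += 1
--             if arg_idx < len(rest):
--                 parts.append(rest[arg_idx])
--                 arg_idx += 1
--             i = j
--         elif fmt_str[i:i+2] == '\\n':
--             if current_str:
--                 parts.append(f'"{current_str}"')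
--                 current_str = ''
--             parts.append('endl')
--             i += 2
--         else:
--             current_str += fmt_str[i]
--             i += 1
--     if current_str:
--         parts.append(f'"{current_str}"')
--
--     if not parts:
--         return 'cout << endl'
--     return 'cout << ' + ' << '.join(parts)
-- ===== SOURCE B (Python) =====
-- # Two-phase re-implementation: tokenize the format body into a token list
-- # (independent of the argument list), then render the tokens with a fold.
--
-- _SPEC_CHARS = 'diouxXeEfgGaAcspnlhqjzt.0123456789-+ #*L'
--
-- def _tokenize(s):
--     """Split the format body into tokens: ('spec',), ('endl',), ('pct',), ('lit', ch)."""
--     toks = []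
--     i = 0
--     n = len(s)
--     while i < n:
--         c = s[i]
--         if c == '%' and i + 1 < n:
--             d = s[i + 1]
--             if d == 'n':
--                 toks.append(('endl',))
--                 i += 2
--             elif d == '%':
--                 toks.append(('pct',))
--                 i += 2
--             else:
--                 j = i + 1
--                 while j < n and s[j] in _SPEC_CHARS:
--                     j += 1
--                 toks.append(('spec',))
--                 i = j
--         elif c == '\\' and i + 1 < n and s[i + 1] == 'n':
--             toks.append(('endl',))
--             i += 2
--         else:
--             toks.append(('lit', c))
--             i += 1
--     return toks
--
--
-- def _render(toks, rest):
--     parts = []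
--     cur = ''
--     for t in toks:
--         kind = t[0]
--         if kind == 'lit':
--             cur += t[1]
--             continue
--         if cur:
--             parts.append('"%s"' % cur)
--         if kind == 'endl':
--             parts.append('endl')
--             cur = ''
--         elif kind == 'pct':
--             cur = '%'
--         else:  # spec
--             cur = ''
--             if rest:
--                 parts.append(rest[0])
--                 rest = rest[1:]
--     if cur:
--         parts.append('"%s"' % cur)
--     return parts
--
--
-- def _printf_to_cout(args):
--     if not args:
--         return 'cout << endl'
--     fmt = args[0]
--     if fmt.startswith('string('):
--         fmt = fmt[7:-1]
--     if not fmt.startswith('"'):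
--         return 'cout << ' + fmt
--     parts = _render(_tokenize(fmt[1:-1]), args[1:])
--     if not parts:
--         return 'cout << endl'
--     return 'cout << ' + ' << '.join(parts)
-- ===== Notes on version B (the rewrite author's own statement) =====
-- stated objective: alternative
-- what changed: Replaces A's single-pass index scanner (interleaving parsing with output/arg-consumption state) by a two-phase pipeline: a tokenizer that splits the format body into spec/endl/%%/literal tokens independently of the argument list, then a separate render fold over the token list.
import Mathlib
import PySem

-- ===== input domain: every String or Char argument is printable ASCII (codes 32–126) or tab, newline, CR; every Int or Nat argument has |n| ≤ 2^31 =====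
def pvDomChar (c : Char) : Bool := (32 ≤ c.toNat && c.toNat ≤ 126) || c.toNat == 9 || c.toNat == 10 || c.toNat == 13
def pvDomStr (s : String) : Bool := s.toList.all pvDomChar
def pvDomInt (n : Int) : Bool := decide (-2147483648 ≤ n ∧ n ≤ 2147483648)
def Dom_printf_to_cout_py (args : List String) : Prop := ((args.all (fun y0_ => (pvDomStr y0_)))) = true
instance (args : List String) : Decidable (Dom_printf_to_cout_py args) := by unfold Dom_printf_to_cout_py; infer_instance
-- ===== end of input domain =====

-- B replaces A's single-pass index scanner by a two-phase tokenize-then-render pipeline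
-- (objective: alternative structure, same cost); return values agree on all inputs.

-- shared helper: membership of c in the format-specifier char class (both Pythons test
-- `s[j] in 'diouxXeEfgGaAcspnlhqjzt.0123456789-+ #*L'`)
def pvInSpec (c : Char) : Bool :=
  PySem.Str.isIn (String.ofList [c]) "diouxXeEfgGaAcspnlhqjzt.0123456789-+ #*L"

-- shared helper: the skip loop `while j < n and s[j] in CLASS: j += 1` of both Pythons,
-- as the remaining suffix after position j
def pvSkipSpec : List Char → List Char
  | [] => []
  | c :: cs => if pvInSpec c then pvSkipSpec cs else c :: cs

-- (cited by the decreasing_by of the ports)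
theorem pvSkipSpec_length_le (l : List Char) : (pvSkipSpec l).length ≤ l.length := by
  induction l with
  | nil => simp [pvSkipSpec]
  | cons c cs ih => simp only [pvSkipSpec]; split <;> simp <;> omega

-- Python's f'"{cur}"'
def pvQuote (cur : List Char) : String := String.ofList ('"' :: (cur ++ ['"']))

-- ===== PORT A =====
-- the while loop of A: state = (remaining fmt chars, parts, current_str, rest, arg_idx)
def pvLoopA (cs : List Char) (parts : List String) (cur : List Char)
    (rest : List String) (argIdx : Nat) : List String :=
  match cs with
  | [] => if cur ≠ [] then parts ++ [pvQuote cur] else parts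
  | c :: cs' =>
    if c = '%' ∧ cs' ≠ [] then
      -- flush current_str, then dispatch on spec = fmt_str[i+1]
      let parts1 := if cur ≠ [] then parts ++ [pvQuote cur] else parts
      let d := cs'.headD ' '
      if d = 'n' then pvLoopA cs'.tail (parts1 ++ ["endl"]) [] rest argIdx
      else if d = '%' then pvLoopA cs'.tail parts1 ['%'] rest argIdx
      else
        let rem := pvSkipSpec cs'
        if argIdx < rest.length then
          pvLoopA rem (parts1 ++ [rest.getD argIdx ""]) [] rest (argIdx + 1)
        else pvLoopA rem parts1 [] rest argIdx
    else if c = '\\' ∧ cs'.headD ' ' = 'n' then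
      -- fmt_str[i:i+2] == '\n'
      let parts1 := if cur ≠ [] then parts ++ [pvQuote cur] else parts
      pvLoopA cs'.tail (parts1 ++ ["endl"]) [] rest argIdx
    else pvLoopA cs' parts (cur ++ [c]) rest argIdx
  termination_by cs.length
  decreasing_by
    all_goals simp_all [List.length_tail]
    all_goals exact pvSkipSpec_length_le _

def printf_to_cout_py (args : List String) : String :=
  match args with
  | [] => "cout << endl"
  | fmt0 :: rest =>
    let fmt := if PySem.Str.startswith fmt0 "string(" then
                 PySem.Str.slice fmt0 (some 7) (some (-1)) else fmt0
    if !PySem.Str.startswith fmt "\"" then "cout << " ++ fmt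
    else
      let fmtStr := PySem.Str.slice fmt (some 1) (some (-1))
      let parts := pvLoopA fmtStr.toList [] [] rest 0
      if parts = [] then "cout << endl"
      else "cout << " ++ PySem.Str.join " << " parts

-- ===== PORT B =====
-- B phase 1: tokenize the format body (independent of the argument list)
inductive PvTok where
  | spec : PvTok
  | endl : PvTok
  | pct : PvTok
  | lit : Char → PvTok
  deriving DecidableEq, Repr

def pvTokenize (cs : List Char) : List PvTok :=
  match cs with
  | [] => []
  | c :: cs' =>
    if c = '%' ∧ cs' ≠ [] then
      if cs'.headD ' ' = 'n' then .endl :: pvTokenize cs'.tail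
      else if cs'.headD ' ' = '%' then .pct :: pvTokenize cs'.tail
      else .spec :: pvTokenize (pvSkipSpec cs')
    else if c = '\\' ∧ cs'.headD ' ' = 'n' then .endl :: pvTokenize cs'.tail
    else .lit c :: pvTokenize cs'
  termination_by cs.length
  decreasing_by
    all_goals simp_all [List.length_tail]
    all_goals exact pvSkipSpec_length_le _

-- B phase 2: the for-loop of _render; state = (remaining tokens, remaining args, parts, cur)
def pvRenderLoop : List PvTok → List String → List String → List Char → List String
  | [], _, parts, cur => if cur ≠ [] then parts ++ [pvQuote cur] else parts
  | .lit c :: ts, rest, parts, cur => pvRenderLoop ts rest parts (cur ++ [c])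
  | .endl :: ts, rest, parts, cur =>
    pvRenderLoop ts rest ((if cur ≠ [] then parts ++ [pvQuote cur] else parts) ++ ["endl"]) []
  | .pct :: ts, rest, parts, cur =>
    pvRenderLoop ts rest (if cur ≠ [] then parts ++ [pvQuote cur] else parts) ['%']
  | .spec :: ts, [], parts, cur =>
    pvRenderLoop ts [] (if cur ≠ [] then parts ++ [pvQuote cur] else parts) []
  | .spec :: ts, a :: rest', parts, cur =>
    pvRenderLoop ts rest' ((if cur ≠ [] then parts ++ [pvQuote cur] else parts) ++ [a]) []

def printf_to_cout_py_alt (args : List String) : String :=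
  match args with
  | [] => "cout << endl"
  | fmt0 :: rest =>
    let fmt := if PySem.Str.startswith fmt0 "string(" then
                 PySem.Str.slice fmt0 (some 7) (some (-1)) else fmt0
    if !PySem.Str.startswith fmt "\"" then "cout << " ++ fmt
    else
      let fmtStr := PySem.Str.slice fmt (some 1) (some (-1))
      let parts := pvRenderLoop (pvTokenize fmtStr.toList) rest [] []
      if parts = [] then "cout << endl"
      else "cout << " ++ PySem.Str.join " << " parts

-- ===== PRECONDITION & SPEC =====
def Spec_printf_to_cout_py (args : List String) (out : String) : Prop := out = printf_to_cout_py_alt args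
instance (args : List String) (out : String) : Decidable (Spec_printf_to_cout_py args out) := by unfold Spec_printf_to_cout_py; infer_instance

-- ===== CLAIM (what is proved, stated in full; the proofs are below) =====
def Claim_equal_printf_to_cout_py : Prop := ∀ (args : List String), Dom_printf_to_cout_py args → Spec_printf_to_cout_py args (printf_to_cout_py args)

-- ===== LEMMAS AND PROOFS =====

-- A's scanner equals B's tokenize-then-render on every loop state
theorem pvLoopA_eq_render (cs : List Char) (parts : List String) (cur : List Char)
    (rest : List String) (argIdx : Nat) :
    pvLoopA cs parts cur rest argIdx
      = pvRenderLoop (pvTokenize cs) (rest.drop argIdx) parts cur := by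
  match cs with
  | [] => simp [pvLoopA, pvTokenize, pvRenderLoop]
  | c :: cs' =>
    rw [pvLoopA, pvTokenize]
    by_cases h1 : c = '%' ∧ cs' ≠ []
    · rw [if_pos h1, if_pos h1]
      by_cases hn : cs'.headD ' ' = 'n'
      · rw [if_pos hn, if_pos hn, pvLoopA_eq_render, pvRenderLoop]
      · rw [if_neg hn, if_neg hn]
        by_cases hp : cs'.headD ' ' = '%'
        · rw [if_pos hp, if_pos hp, pvLoopA_eq_render, pvRenderLoop]
        · rw [if_neg hp, if_neg hp]
          by_cases ha : argIdx < rest.length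
          · rw [if_pos ha, List.drop_eq_getElem_cons ha, pvRenderLoop,
              List.getD_eq_getElem rest "" ha, pvLoopA_eq_render]
          · have hnil : rest.drop argIdx = [] := List.drop_eq_nil_of_le (by omega)
            rw [if_neg ha, hnil, pvRenderLoop, pvLoopA_eq_render, hnil]
    · rw [if_neg h1, if_neg h1]
      by_cases h2 : c = '\\' ∧ cs'.headD ' ' = 'n'
      · rw [if_pos h2, if_pos h2, pvLoopA_eq_render, pvRenderLoop]
      · rw [if_neg h2, if_neg h2, pvLoopA_eq_render, pvRenderLoop]
  termination_by cs.length
  decreasing_by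
    all_goals simp_all [List.length_tail]
    all_goals exact pvSkipSpec_length_le _

-- ===== VERDICT (by name: the statement is the Claim_ definition above) =====
theorem printf_to_cout_py_spec : Claim_equal_printf_to_cout_py := by
  intro args _
  unfold Spec_printf_to_cout_py printf_to_cout_py printf_to_cout_py_alt
  match args with
  | [] => rfl
  | fmt0 :: rest =>
    simp only [pvLoopA_eq_render, List.drop_zero]
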